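-- pv_equiv track=rewrite | github.com/KingHyoman/CodingTest | ProblemSolving/uesang.py | uesang
-- ===== SOURCE A (Python) =====
-- def uesang(input):
--     new_dic = {}
--     for element in input:
--         if element[1] not in new_dic:
--             new_dic[element[1]] = 1
--         else:
--             new_dic[element[1]] += 1
--
--     result = 1
--     for elem in new_dic:
--         result *= (1 + new_dic[elem])
--     return result - 1
-- ===== SOURCE B (Python) =====
-- def uesang(input):
--     # sort the second components, then one run-length scan multiplies (1 + run) per group
--     ys = sorted(e[1] for e in input)
--     result = 1
--     while ys:
--         x = ys[0]
--         rest = ys[1:]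
--         run = 0
--         while run < len(rest) and rest[run] == x:
--             run += 1
--         result *= 2 + run
--         ys = rest[run:]
--     return result - 1
-- ===== Notes on version B (the rewrite author's own statement) =====
-- stated objective: alternative
-- what changed: Replaces A's dict-based counting pass (hash map of multiplicities, then a product over the dict) by sorting the second components and multiplying (1 + run length) over each maximal run in one linear scan.
import Mathlib
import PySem

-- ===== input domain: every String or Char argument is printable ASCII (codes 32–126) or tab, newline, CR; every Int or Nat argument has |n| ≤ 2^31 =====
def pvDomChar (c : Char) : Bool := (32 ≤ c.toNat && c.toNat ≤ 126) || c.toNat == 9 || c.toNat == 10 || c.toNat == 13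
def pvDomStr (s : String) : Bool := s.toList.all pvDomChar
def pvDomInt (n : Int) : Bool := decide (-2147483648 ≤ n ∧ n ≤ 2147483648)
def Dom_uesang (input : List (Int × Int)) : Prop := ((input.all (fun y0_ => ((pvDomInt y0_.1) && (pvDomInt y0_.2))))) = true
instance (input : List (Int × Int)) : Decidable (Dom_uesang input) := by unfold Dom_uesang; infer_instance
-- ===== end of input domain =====

-- B replaces A's dict-counting pass by sort-then-run-length-scan (alternative decomposition, not faster).

-- ===== PORT A =====
-- the first loop of A: build new_dic
def uesangNewDic (input : List (Int × Int)) : PySem.Dict Int Int :=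
  input.foldl (fun d element =>
    if d.contains element.2 = false then d.insert element.2 1
    else d.modify element.2 0 (· + 1)) PySem.Dict.empty

def uesang (input : List (Int × Int)) : Int :=
  ((uesangNewDic input).keys.foldl
    (fun result elem => result * (1 + (uesangNewDic input).getD elem 0)) 1) - 1

-- ===== PORT B =====
-- the outer 'while ys:' loop of Source B; the inner run-counting while-loop is the takeWhile length
def uesangRunLoop : List Int → Int → Int
  | [], result => result
  | x :: rest, result =>
    let run := (rest.takeWhile (fun y => y == x)).length
    uesangRunLoop (rest.drop run) (result * (2 + (run : Int)))
termination_by l _ => l.length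
decreasing_by simp

def uesang_alt (input : List (Int × Int)) : Int :=
  uesangRunLoop (PySem.List.sorted (input.map (fun e => e.2)) (fun x => x) false) 1 - 1

-- ===== PRECONDITION & SPEC =====
def Spec_uesang (input : List (Int × Int)) (out : Int) : Prop := out = uesang_alt input
instance (input : List (Int × Int)) (out : Int) : Decidable (Spec_uesang input out) := by unfold Spec_uesang; infer_instance

-- ===== CLAIM (what is proved, stated in full; the proofs are below) =====
def Claim_equal_uesang : Prop := ∀ (input : List (Int × Int)), Dom_uesang input → Spec_uesang input (uesang input)

-- ===== LEMMAS AND PROOFS =====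

-- canonical value both programs compute: product of (1 + multiplicity) over the distinct second components
def uesangF (l : List Int) : Int := ∏ k ∈ l.toFinset, (1 + (l.count k : Int))

theorem uesang_foldl_mul (l : List Int) (g : Int → Int) (a : Int) :
    l.foldl (fun r k => r * g k) a = a * (l.map g).prod := by
  induction l generalizing a with
  | nil => simp
  | cons x t ih => simp [ih, mul_assoc]

theorem uesang_insert_eq_modify (d : PySem.Dict Int Int) (k : Int) (h : d.contains k = false) :
    d.insert k 1 = d.modify k 0 (· + 1) := by
  simp [PySem.Dict.insert, PySem.Dict.modify, h,
    PySem.Dict.getD_of_not_contains (d := d) (k := k) (d0 := 0) h]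

theorem uesangF_perm (l l' : List Int) (h : l.Perm l') : uesangF l = uesangF l' := by
  unfold uesangF
  rw [List.toFinset_eq_of_perm l l' h]
  exact Finset.prod_congr rfl (fun k _ => by rw [h.count_eq])

-- A computes uesangF of the second components, minus 1
theorem uesang_eq_F (input : List (Int × Int)) :
    uesang input = uesangF (input.map (fun e => e.2)) - 1 := by
  unfold uesang uesangNewDic
  have hcongr : input.foldl (fun d element =>
      if d.contains element.2 = false then d.insert element.2 1
      else d.modify element.2 0 (· + 1)) (PySem.Dict.empty : PySem.Dict Int Int)
      = input.foldl (fun d element => d.modify element.2 0 (· + 1)) PySem.Dict.empty := by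
    refine PySem.List.foldl_congr_mem _ _ _ _ (fun d e _ => ?_)
    by_cases h : d.contains e.2 = false
    · simp [h, uesang_insert_eq_modify d e.2 h]
    · simp [h]
  rw [hcongr]
  have hctr : input.foldl (fun d element => d.modify element.2 0 (· + 1)) (PySem.Dict.empty : PySem.Dict Int Int)
      = PySem.Dict.counter (input.map (fun e => e.2)) := by
    rw [PySem.Dict.counter_eq_foldl, List.foldl_map]
  rw [hctr]
  set ys := input.map (fun e => e.2) with hys
  rw [PySem.Dict.keys_counter]
  have hget : ∀ (r k : Int), r * (1 + (PySem.Dict.counter ys).getD k 0)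
      = r * (1 + (ys.count k : Int)) := fun r k => by rw [PySem.Dict.getD_counter]
  simp only [hget]
  rw [uesang_foldl_mul]
  have hnd : (PySem.Set.ofList ys).Nodup := PySem.Set.nodup_ofList ys
  have htf : (PySem.Set.ofList ys).toFinset = ys.toFinset := by
    apply Finset.ext
    intro a
    simp [List.mem_toFinset, PySem.Set.mem_ofList]
  unfold uesangF
  rw [← htf, List.prod_toFinset _ hnd]
  ring

theorem uesang_drop_takeWhile (p : Int → Bool) (rest : List Int) :
    rest.drop (rest.takeWhile p).length = rest.dropWhile p := by
  induction rest with
  | nil => simp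
  | cons a t ih => by_cases h : p a <;> simp [h, ih]

-- elements of a takeWhile (· == x) run all equal x
theorem uesang_takeWhile_all_eq (x : Int) (rest : List Int) :
    ∀ y ∈ rest.takeWhile (fun y => y == x), y = x := by
  intro y hy
  have := List.mem_takeWhile_imp hy
  simpa using this

-- B's run-length loop computes uesangF on a nondecreasing list
theorem uesangRunLoop_eq_F (l : List Int) (a : Int) :
    l.Pairwise (· ≤ ·) → uesangRunLoop l a = a * uesangF l := by
  induction l, a using uesangRunLoop.induct with
  | case1 result => intro _; simp [uesangRunLoop, uesangF]
  | case2 x rest result run ih =>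
    intro hs
    rw [List.pairwise_cons] at hs
    obtain ⟨hx, hrest⟩ := hs
    set t := rest.takeWhile (fun y => y == x) with ht
    set d := rest.drop t.length with hd
    have hd' : d = rest.dropWhile (fun y => y == x) := by
      rw [hd, ht, uesang_drop_takeWhile]
    have hsplit : rest = t ++ d := by
      rw [ht, hd']
      exact (List.takeWhile_append_dropWhile (p := fun y => y == x) (l := rest)).symm
    have hdsub : d.Sublist rest := by rw [hd]; exact List.drop_sublist _ _
    have hdsorted : d.Pairwise (· ≤ ·) := List.Pairwise.sublist hdsub hrest
    have hxd : x ∉ d := by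
      intro hmem
      have hdnil : d ≠ [] := fun h => by rw [h] at hmem; simp at hmem
      obtain ⟨y, d', hdc⟩ := List.exists_cons_of_ne_nil hdnil
      have hy : y ∈ rest := hdsub.mem (hdc ▸ List.mem_cons_self)
      have hxy : x ≤ y := hx y hy
      have hne : y ≠ x := by
        have hhead := List.head?_dropWhile_not (fun y => y == x) rest
        rw [← hd', hdc] at hhead
        simpa using hhead
      have hxlt : x < y := lt_of_le_of_ne hxy (fun e => hne e.symm)
      rw [hdc, List.pairwise_cons] at hdsorted
      rw [hdc] at hmem
      rcases List.mem_cons.mp hmem with hmem | hmem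
      · omega
      · exact absurd (hdsorted.1 x hmem) (by omega)
    have htx : ∀ y ∈ t, y = x := uesang_takeWhile_all_eq x rest
    have hcx : (x :: rest).count x = 1 + t.length := by
      rw [hsplit]
      simp [List.count_append, List.count_eq_length.mpr (fun y hy => (htx y hy).symm),
        List.count_eq_zero.mpr hxd, Nat.add_comm]
    have hck : ∀ k ∈ d.toFinset, (x :: rest).count k = d.count k := by
      intro k hk
      have hkx : k ≠ x := fun e => hxd (e ▸ List.mem_toFinset.mp hk)
      rw [hsplit]
      simp [List.count_cons, List.count_append,
        List.count_eq_zero.mpr (fun hkt => hkx (htx k hkt))]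
      omega
    have hxtf : x ∉ d.toFinset := fun h => hxd (List.mem_toFinset.mp h)
    have htf : (x :: rest).toFinset = insert x d.toFinset := by
      have hxrest : (x :: rest) = x :: t ++ d := by rw [hsplit]; rfl
      rw [hxrest]
      apply Finset.ext
      intro a
      simp only [List.toFinset_cons, List.toFinset_append, Finset.mem_insert,
        Finset.mem_union, List.mem_toFinset]
      constructor
      · rintro ((h | h) | h)
        · exact Or.inl h
        · exact Or.inl (htx a h)
        · exact Or.inr h
      · rintro (h | h)
        · exact Or.inl (Or.inl h)
        · exact Or.inr h
    have hF : uesangF (x :: rest) = (2 + (t.length : Int)) * uesangF d := by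
      unfold uesangF
      rw [htf, Finset.prod_insert hxtf, hcx]
      have : ∏ k ∈ d.toFinset, (1 + ((x :: rest).count k : Int))
          = ∏ k ∈ d.toFinset, (1 + (d.count k : Int)) :=
        Finset.prod_congr rfl (fun k hk => by rw [hck k hk])
      rw [this]
      push_cast
      ring
    rw [uesangRunLoop]
    show uesangRunLoop d (result * (2 + (run : Int))) = result * uesangF (x :: rest)
    rw [ih hdsorted, hF]
    have hrt : (run : Int) = (t.length : Int) := by rw [ht]
    rw [hrt]
    ring

-- ===== VERDICT (by name: the statement is the Claim_ definition above) =====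
theorem uesang_spec : Claim_equal_uesang := by
  intro input _
  unfold Spec_uesang uesang_alt
  rw [uesang_eq_F]
  set ys := input.map (fun e => e.2)
  have hperm : (PySem.List.sorted ys (fun x => x) false).Perm ys := PySem.List.sorted_perm ys _ _
  have hsorted : (PySem.List.sorted ys (fun x => x) false).Pairwise (· ≤ ·) := by
    have := PySem.List.sorted_pairwise ys (fun x => x)
    simpa using this
  rw [uesangRunLoop_eq_F _ 1 hsorted, uesangF_perm _ _ hperm.symm]
  ring
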